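-- pv_equiv track=rewrite | github.com/HodzaArmen/P1 | ZemljevidOvir/ZemljevidOvir.py | stevilo_ovir
-- ===== SOURCE A (Python) =====
-- def stevilo_ovir(vrstica):
--     steviloOvir = 0
--     trenutnaOvira = 0
--     for znak in vrstica:
--         if znak == "#":
--             trenutnaOvira += 1
--         else:
--             if trenutnaOvira >= 1:
--                 steviloOvir += 1
--             trenutnaOvira = 0
--     if trenutnaOvira >= 1:
--         steviloOvir += 1
--     return steviloOvir
-- ===== SOURCE B (Python) =====
-- def stevilo_ovir(vrstica):
--     # Count run starts: a '#' whose predecessor (or a padded leading space) is not '#'.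
--     return sum(1 for p, c in zip(" " + vrstica, vrstica) if c == "#" and p != "#")
-- ===== Notes on version B (the rewrite author's own statement) =====
-- stated objective: idiomatic
-- what changed: Replaced the explicit state machine (running-run counter with an end-of-string flush) by a one-line sum over zip(' '+s, s) counting run starts, i.e. '#' characters not preceded by '#'.
import Mathlib
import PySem

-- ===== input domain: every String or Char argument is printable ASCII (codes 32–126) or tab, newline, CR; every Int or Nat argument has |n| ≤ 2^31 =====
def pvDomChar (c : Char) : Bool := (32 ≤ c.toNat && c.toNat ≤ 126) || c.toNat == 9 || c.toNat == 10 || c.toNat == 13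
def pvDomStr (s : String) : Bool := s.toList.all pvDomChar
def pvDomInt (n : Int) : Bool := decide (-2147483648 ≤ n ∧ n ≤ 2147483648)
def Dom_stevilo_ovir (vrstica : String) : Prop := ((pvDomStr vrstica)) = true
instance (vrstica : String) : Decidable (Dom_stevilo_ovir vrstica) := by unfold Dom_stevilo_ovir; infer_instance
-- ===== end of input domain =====

-- B replaces A's state machine (running counter + final flush) by counting run starts
-- over zip(" "+s, s); objective: idiomatic, same cost.

-- ===== PORT A =====
-- state = (steviloOvir, trenutnaOvira)
def stevilo_ovir (vrstica : String) : Int :=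
  let st := vrstica.toList.foldl
    (fun (st : Int × Int) znak =>
      if znak = '#' then (st.1, st.2 + 1)
      else (if st.2 ≥ 1 then st.1 + 1 else st.1, 0))
    (0, 0)
  if st.2 ≥ 1 then st.1 + 1 else st.1

-- ===== PORT B =====
-- sum(1 for p, c in zip(" " + vrstica, vrstica) if c == "#" and p != "#")
def stevilo_ovir_alt (vrstica : String) : Int :=
  ((' ' :: vrstica.toList).zip vrstica.toList).foldl
    (fun (acc : Int) pc => if pc.2 = '#' ∧ pc.1 ≠ '#' then acc + 1 else acc) 0

-- ===== PRECONDITION & SPEC =====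
def Spec_stevilo_ovir (vrstica : String) (out : Int) : Prop := out = stevilo_ovir_alt vrstica
instance (vrstica : String) (out : Int) : Decidable (Spec_stevilo_ovir vrstica out) := by unfold Spec_stevilo_ovir; infer_instance

-- ===== CLAIM (what is proved, stated in full; the proofs are below) =====
def Claim_equal_stevilo_ovir : Prop := ∀ (vrstica : String), Dom_stevilo_ovir vrstica → Spec_stevilo_ovir vrstica (stevilo_ovir vrstica)

-- ===== LEMMAS AND PROOFS =====

-- B's fold with an arbitrary accumulator splits off the accumulator.
theorem pv_b_acc (ps : List (Char × Char)) (t : Int) :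
    ps.foldl (fun (acc : Int) pc => if pc.2 = '#' ∧ pc.1 ≠ '#' then acc + 1 else acc) t
      = t + ps.foldl (fun (acc : Int) pc => if pc.2 = '#' ∧ pc.1 ≠ '#' then acc + 1 else acc) 0 := by
  induction ps generalizing t with
  | nil => simp
  | cons pc r ih =>
    simp only [List.foldl_cons]
    rw [ih, ih (if pc.2 = '#' ∧ pc.1 ≠ '#' then (0:Int) + 1 else 0)]
    split_ifs <;> ring

-- Loop invariant: A's fold-then-flush from state (so, cur) after previous char prev
-- equals so + (1 if a run is open) + B's run-start count over the rest.
theorem pv_key (r : List Char) (so cur : Int) (prev : Char)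
    (h0 : 0 ≤ cur) (h1 : prev = '#' ↔ 1 ≤ cur) :
    (if (r.foldl
        (fun (st : Int × Int) znak =>
          if znak = '#' then (st.1, st.2 + 1)
          else (if st.2 ≥ 1 then st.1 + 1 else st.1, 0)) (so, cur)).2 ≥ 1
      then (r.foldl
        (fun (st : Int × Int) znak =>
          if znak = '#' then (st.1, st.2 + 1)
          else (if st.2 ≥ 1 then st.1 + 1 else st.1, 0)) (so, cur)).1 + 1
      else (r.foldl
        (fun (st : Int × Int) znak =>
          if znak = '#' then (st.1, st.2 + 1)
          else (if st.2 ≥ 1 then st.1 + 1 else st.1, 0)) (so, cur)).1)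
      = so + (if 1 ≤ cur then 1 else 0)
        + ((prev :: r).zip r).foldl
            (fun (acc : Int) pc => if pc.2 = '#' ∧ pc.1 ≠ '#' then acc + 1 else acc) 0 := by
  induction r generalizing so cur prev with
  | nil =>
    simp only [List.foldl_nil, List.zip_nil_right, List.foldl_nil, ge_iff_le]
    split_ifs <;> ring
  | cons c r ih =>
    simp only [List.foldl_cons, List.zip_cons_cons]
    rw [pv_b_acc]
    by_cases hc : c = '#'
    · simp only [hc, if_true]
      rw [ih so (cur + 1) '#' (by omega) ⟨fun _ => by omega, fun _ => rfl⟩]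
      by_cases hp : prev = '#'
      · have hcur : 1 ≤ cur := h1.mp hp
        simp only [hp, ne_eq, not_true_eq_false, and_false, ite_false,
          if_pos hcur, if_pos (show (1:Int) ≤ cur + 1 by omega)]
        ring
      · have hcur : ¬ (1:Int) ≤ cur := fun h => hp (h1.mpr h)
        simp only [ne_eq, hp, not_false_eq_true, and_true, ite_true,
          if_neg hcur, if_pos (show (1:Int) ≤ cur + 1 by omega)]
        ring
    · simp only [hc, if_false, false_and]
      rw [ih _ 0 c (le_refl 0) (by simp [hc])]
      simp only [show ¬ (1:Int) ≤ (0:Int) by omega, if_false]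
      split_ifs with h <;> ring

-- ===== VERDICT (by name: the statement is the Claim_ definition above) =====
theorem stevilo_ovir_spec : Claim_equal_stevilo_ovir := by
  intro vrstica _
  unfold Spec_stevilo_ovir stevilo_ovir stevilo_ovir_alt
  rw [pv_key vrstica.toList 0 0 ' ' (le_refl 0) (by simp)]
  simp
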